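-- pv_equiv track=rewrite | github.com/Ravinderbaid/interviewbit | Day35/swapElements.py | solve
-- ===== SOURCE A (Python) =====
-- def solve(A, B):
--     Ad=list(A)
--     n=len(A)
--     mxi=max(A)
--     for i in range(1,n+1):
--         mx=Ad[i-1]
--         for j in range(i,n+1,i):
--             Ad[j-1]=max(Ad[j-1],A[i-1])
--             mx=max(mx,A[j-1])
--         Ad[i-1]=mx
--     ans=[]
--     for q in B:
--         if q[1]==0:
--             ans.append(A[q[0]-1])
--         elif q[1]==1:
--             ans.append(Ad[q[0]-1])
--         else:
--             ans.append(mxi)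
--     return ans
-- ===== SOURCE B (Python) =====
-- def solve(A, B):
--     n = len(A)
--     mxi = max(A)
--     # Ad[i-1] = max of A over every j that divides i or is a multiple of i,
--     # computed directly from that definition by a divisibility test per pair
--     # (no sieve, no in-place scatter).
--     Ad = []
--     for i in range(1, n + 1):
--         best = A[i - 1]
--         for j in range(1, n + 1):
--             if (i % j == 0 or j % i == 0) and A[j - 1] > best:
--                 best = A[j - 1]
--         Ad.append(best)
--     return [A[q[0] - 1] if q[1] == 0 else Ad[q[0] - 1] if q[1] == 1 else mxi
--             for q in B]
-- ===== Notes on version B (the rewrite author's own statement) =====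
-- stated objective: alternative
-- what changed: A's in-place harmonic sieve (stride loops that scatter each A[i-1] into the evolving array's multiples while reading it back as the running-max seed) is replaced by a direct brute-force definition: for each i, one full pass over j=1..n testing the divisibility predicate (i%j==0 or j%i==0) and keeping the running max, with the query loop as a comprehension; B trades A's O(n log n) sieve for an O(n^2) but definition-shaped computation with no array mutation.
import Mathlib
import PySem

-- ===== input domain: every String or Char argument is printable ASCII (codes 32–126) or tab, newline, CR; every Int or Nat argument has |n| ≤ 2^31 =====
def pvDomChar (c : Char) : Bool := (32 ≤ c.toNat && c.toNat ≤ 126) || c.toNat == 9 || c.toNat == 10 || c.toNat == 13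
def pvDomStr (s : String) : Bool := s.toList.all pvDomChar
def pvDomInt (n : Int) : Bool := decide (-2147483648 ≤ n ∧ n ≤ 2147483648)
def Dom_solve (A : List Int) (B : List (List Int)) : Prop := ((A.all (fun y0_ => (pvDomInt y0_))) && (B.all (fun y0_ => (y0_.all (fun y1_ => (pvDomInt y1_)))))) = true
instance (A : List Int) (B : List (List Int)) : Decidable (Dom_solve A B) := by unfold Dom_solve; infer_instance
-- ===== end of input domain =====

-- B replaces A's in-place stride sieve by the direct brute-force definition: for each index i
-- one full pass over j = 1..n testing 'i % j == 0 or j % i == 0' with a running max (objective: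
-- alternative; no array mutation, a divisibility-test scan instead of A's sieve).


-- ===== PORT A =====
-- Loop indices i-1, j-1 are in [0, n) on every iteration, so pyGetD/pySetD are exact there;
-- query indices q[0]-1 may be negative (Python wraparound) and pyGetD is exact under
-- Pre_solve's index-range condition.
-- body of 'for j in range(i, n+1, i): Ad[j-1]=max(Ad[j-1],A[i-1]); mx=max(mx,A[j-1])'
def stepInnerA (A : List Int) (i : Int) (p : List Int × Int) (j : Int) : List Int × Int :=
  (PySem.List.pySetD p.1 (j-1) (max (PySem.List.pyGetD p.1 (j-1) 0) (PySem.List.pyGetD A (i-1) 0)),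
   max p.2 (PySem.List.pyGetD A (j-1) 0))

-- body of the outer 'for i in range(1, n+1)' loop
def stepOuterA (A : List Int) (n : Int) (Ad : List Int) (i : Int) : List Int :=
  let mx := PySem.List.pyGetD Ad (i-1) 0
  let p := (PySem.List.pyRange i (n+1) i).foldl (stepInnerA A i) (Ad, mx)
  PySem.List.pySetD p.1 (i-1) p.2

def solve (A : List Int) (B : List (List Int)) : List Int :=
  let n : Int := PySem.List.len A
  let mxi : Int := (PySem.List.max? A (fun y => y)).getD 0  -- max(A); Pre_solve excludes A = []
  let Ad : List Int := (PySem.List.pyRange 1 (n+1) 1).foldl (stepOuterA A n) A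
  B.foldl (fun ans q =>
    if PySem.List.pyGetD q 1 0 = 0 then ans ++ [PySem.List.pyGetD A (PySem.List.pyGetD q 0 0 - 1) 0]
    else if PySem.List.pyGetD q 1 0 = 1 then ans ++ [PySem.List.pyGetD Ad (PySem.List.pyGetD q 0 0 - 1) 0]
    else ans ++ [mxi]) []

-- ===== PORT B =====
-- body of 'if (i % j == 0 or j % i == 0) and A[j-1] > best: best = A[j-1]'
def stepBruteB (A : List Int) (i : Int) (best j : Int) : Int :=
  if (PySem.Int.mod i j = 0 ∨ PySem.Int.mod j i = 0) ∧ PySem.List.pyGetD A (j-1) 0 > best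
  then PySem.List.pyGetD A (j-1) 0 else best

-- one row of B: 'best = A[i-1]; for j in range(1, n+1): …'
def rowB (A : List Int) (n i : Int) : Int :=
  (PySem.List.pyRange 1 (n+1) 1).foldl (stepBruteB A i) (PySem.List.pyGetD A (i-1) 0)

def solve_alt (A : List Int) (B : List (List Int)) : List Int :=
  let n : Int := PySem.List.len A
  let mxi : Int := (PySem.List.max? A (fun y => y)).getD 0  -- max(A); Pre_solve excludes A = []
  let Ad : List Int := (PySem.List.pyRange 1 (n+1) 1).foldl (fun Ad i => Ad ++ [rowB A n i]) []
  B.map (fun q =>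
    if PySem.List.pyGetD q 1 0 = 0 then PySem.List.pyGetD A (PySem.List.pyGetD q 0 0 - 1) 0
    else if PySem.List.pyGetD q 1 0 = 1 then PySem.List.pyGetD Ad (PySem.List.pyGetD q 0 0 - 1) 0
    else mxi)

-- ===== PRECONDITION & SPEC =====
-- Pre_solve excludes exactly the inputs where Python A raises: max([]) is a ValueError, a query
-- of length < 2 raises IndexError on q[1], and a query with q[1] in {0,1} whose index q[0]-1
-- is outside Python's index range [-n, n) raises IndexError.
def Pre_solve (A : List Int) (B : List (List Int)) : Prop :=
  A ≠ [] ∧ ∀ q ∈ B, 2 ≤ q.length ∧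
    ((q.getD 1 0 = 0 ∨ q.getD 1 0 = 1) →
      (-(A.length : Int) ≤ q.getD 0 0 - 1 ∧ q.getD 0 0 - 1 < (A.length : Int)))
instance (A : List Int) (B : List (List Int)) : Decidable (Pre_solve A B) := by unfold Pre_solve; infer_instance
def pvWitness_solve : List Int × List (List Int) := ([3, 1, 2, 5], [[1, 1], [2, 0], [0, 1], [1, 7]])
def Spec_solve (A : List Int) (B : List (List Int)) (out : List Int) : Prop := out = solve_alt A B
instance (A : List Int) (B : List (List Int)) (out : List Int) : Decidable (Spec_solve A B out) := by unfold Spec_solve; infer_instance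

-- ===== CLAIM (what is proved, stated in full; the proofs are below) =====
def Claim_equal_solve : Prop := ∀ (A : List Int) (B : List (List Int)), Dom_solve A B → Pre_solve A B → Spec_solve A B (solve A B)

-- ===== LEMMAS AND PROOFS =====

-- dvv A t k: max of A over the divisors d+1 ≤ t of k, seeded with A[k-1];
-- FF: the common final value of Ad[k-1] (divisor part, then the multiples of k up to n)
theorem pyRange_cons_of_pos {a b s : Int} (hs : 0 < s) (hab : a < b) :
    PySem.List.pyRange a b s = a :: PySem.List.pyRange (a+s) b s := by
  rw [PySem.List.pyRange_of_pos a b hs, PySem.List.pyRange_of_pos (a+s) b hs]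
  have h2 : (b-a+s-1)/s = (b-a-1)/s + 1 := by
    have h1 : b - a + s - 1 = (b - a - 1) + 1*s := by ring
    rw [h1, Int.add_mul_ediv_right _ _ hs.ne']
  have h0 : 0 ≤ (b-a-1)/s := Int.ediv_nonneg (by omega) hs.le
  by_cases hb : a + s < b
  · have h3 : b - (a+s) + s - 1 = b - a - 1 := by ring
    simp only [if_pos hab, if_pos hb, h2, h3]
    have h4 : ((b-a-1)/s + 1).toNat = ((b-a-1)/s).toNat + 1 := by omega
    rw [h4, List.range_succ_eq_map]
    simp only [List.map_cons, List.map_map, Nat.cast_zero, mul_zero, add_zero]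
    congr 1
    refine List.map_congr_left ?_
    intro k _; simp only [Function.comp_apply, Nat.succ_eq_add_one]; push_cast; ring
  · have hz : (b-a-1)/s = 0 := Int.ediv_eq_zero_of_lt (by omega) (by omega)
    simp only [if_pos hab, if_neg hb, h2, hz]
    norm_num

-- appending one element to a stride range: range(s, b+1, s) gains b exactly when s ∣ b
theorem pyRange_snoc_stride {s b : Int} (hs : 0 < s) (hsb : s ≤ b) :
    PySem.List.pyRange s (b+1) s =
      PySem.List.pyRange s b s ++ (if s ∣ b then [b] else []) := by
  rw [PySem.List.pyRange_of_pos s (b+1) hs, PySem.List.pyRange_of_pos s b hs,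
      if_pos (show s < b + 1 by omega)]
  have e1 : (b + 1 - s + s - 1) / s = b / s := by
    rw [(by ring : b + 1 - s + s - 1 = b)]
  rw [e1]
  by_cases hd : s ∣ b
  · obtain ⟨q, hq⟩ := hd
    have hq1 : 1 ≤ q := by nlinarith
    have hbq : b / s = q := by rw [hq, Int.mul_ediv_cancel_left q hs.ne']
    have hbq1 : (b - s + s - 1) / s = q - 1 := by
      have e2 : b - s + s - 1 = (s-1) + s*(q-1) := by rw [hq]; ring
      rw [e2, Int.add_mul_ediv_left _ _ hs.ne',
          Int.ediv_eq_zero_of_lt (by omega) (by omega)]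
      ring
    have hd' : s ∣ b := ⟨q, hq⟩
    rw [if_pos hd', hbq]
    by_cases hlt : s < b
    · rw [if_pos hlt, hbq1]
      have hq2 : 2 ≤ q := by nlinarith
      have ht : q.toNat = (q-1).toNat + 1 := by omega
      rw [ht, List.range_succ, List.map_append]
      congr 1
      simp only [List.map_cons, List.map_nil]
      congr 2
      have hc : ((q-1).toNat : Int) = q - 1 := by omega
      rw [hc, hq]; ring
    · have hbs : b = s := by omega
      have hq1' : q = 1 := by nlinarith
      rw [if_neg hlt, hq1']
      simp [hbs]
  · have hsb' : s < b := by
      rcases lt_or_eq_of_le hsb with h | h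
      · exact h
      · exact absurd (h ▸ dvd_refl s) hd
    have hr0 : b % s ≠ 0 := fun h => hd (Int.dvd_of_emod_eq_zero h)
    have hrpos : 0 < b % s := lt_of_le_of_ne (Int.emod_nonneg b hs.ne') (Ne.symm hr0)
    have hrlt : b % s < s := Int.emod_lt_of_pos b hs
    have hbe : s * (b / s) + b % s = b := Int.mul_ediv_add_emod b s
    have hbq1 : (b - s + s - 1) / s = b / s := by
      have e2 : b - s + s - 1 = (b % s - 1) + s*(b / s) := by omega
      rw [e2, Int.add_mul_ediv_left _ _ hs.ne',
          Int.ediv_eq_zero_of_lt (by omega) (by omega)]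
      ring
    rw [if_neg hd, if_pos hsb', hbq1, List.append_nil]

def dvv (A : List Int) (t k : Nat) : Int :=
  (List.range t).foldl (fun acc d => if (d+1) ∣ k then max acc (A.getD d 0) else acc) (A.getD (k-1) 0)

def FF (A : List Int) (n k : Nat) : Int :=
  (PySem.List.pyRange (k:Int) ((n:Int)+1) (k:Int)).foldl
    (fun mx j => max mx (PySem.List.pyGetD A (j-1) 0)) (dvv A (k-1) k)

theorem seed_le_foldl_if_max (l : List Nat) (c : Nat → Prop) [DecidablePred c]
    (g : Nat → Int) (s : Int) :
    s ≤ l.foldl (fun acc d => if c d then max acc (g d) else acc) s := by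
  induction l generalizing s with
  | nil => simp
  | cons x xs ih =>
    refine le_trans ?_ (ih (if c x then max s (g x) else s))
    split <;> simp

theorem dvv_ge_seed (A : List Int) (t k : Nat) : A.getD (k-1) 0 ≤ dvv A t k :=
  seed_le_foldl_if_max _ _ _ _

theorem getD_set_eq_ite (l : List Int) (n : Nat) (v d : Int) (k : Nat) (hk : k < l.length) :
    (l.set n v).getD k d = if k = n then v else l.getD k d := by
  rw [List.getD_eq_getElem (l.set n v) d (by simpa using hk), List.getD_eq_getElem l d hk,
      List.getElem_set]
  simp [eq_comm]

theorem innerA_spec (A : List Int) (v : Int) (js : List Int) :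
    ∀ (L : List Int) (mx : Int), (∀ j ∈ js, 1 ≤ j ∧ j ≤ (L.length : Int)) →
    (js.foldl (fun (p : List Int × Int) j =>
        (PySem.List.pySetD p.1 (j-1) (max (PySem.List.pyGetD p.1 (j-1) 0) v),
         max p.2 (PySem.List.pyGetD A (j-1) 0))) (L, mx)).1.length = L.length ∧
    (∀ k : Nat, k < L.length →
      (js.foldl (fun (p : List Int × Int) j =>
        (PySem.List.pySetD p.1 (j-1) (max (PySem.List.pyGetD p.1 (j-1) 0) v),
         max p.2 (PySem.List.pyGetD A (j-1) 0))) (L, mx)).1.getD k 0 =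
        if ((k:Int)+1) ∈ js then max (L.getD k 0) v else L.getD k 0) ∧
    (js.foldl (fun (p : List Int × Int) j =>
        (PySem.List.pySetD p.1 (j-1) (max (PySem.List.pyGetD p.1 (j-1) 0) v),
         max p.2 (PySem.List.pyGetD A (j-1) 0))) (L, mx)).2 =
      js.foldl (fun mx j => max mx (PySem.List.pyGetD A (j-1) 0)) mx := by
  induction js with
  | nil => intro L mx _; simp
  | cons j js ih =>
    intro L mx hb
    obtain ⟨hj1, hj2⟩ := hb j (List.mem_cons_self)
    have hset : PySem.List.pySetD L (j-1) (max (PySem.List.pyGetD L (j-1) 0) v) =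
        L.set (j-1).toNat (max (PySem.List.pyGetD L (j-1) 0) v) :=
      PySem.List.pySetD_of_nonneg L _ (by omega)
    have hlen' : (L.set (j-1).toNat (max (PySem.List.pyGetD L (j-1) 0) v)).length = L.length :=
      List.length_set ..
    have hb' : ∀ x ∈ js, 1 ≤ x ∧ x ≤ ((L.set (j-1).toNat (max (PySem.List.pyGetD L (j-1) 0) v)).length : Int) := by
      intro x hx; rw [hlen']; exact hb x (List.mem_cons_of_mem _ hx)
    obtain ⟨ih1, ih2, ih3⟩ := ih (L.set (j-1).toNat (max (PySem.List.pyGetD L (j-1) 0) v))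
      (max mx (PySem.List.pyGetD A (j-1) 0)) hb'
    simp only [List.foldl_cons, hset]
    refine ⟨ih1.trans hlen', ?_, ih3⟩
    intro k hk
    rw [ih2 k (by rw [hlen']; exact hk)]
    have hLk : (L.set (j-1).toNat (max (PySem.List.pyGetD L (j-1) 0) v)).getD k 0 =
        if k = (j-1).toNat then max (PySem.List.pyGetD L (j-1) 0) v else L.getD k 0 :=
      getD_set_eq_ite L _ _ _ k hk
    have hkj : (k = (j-1).toNat) ↔ ((k:Int)+1 = j) := by omega
    have hx : PySem.List.pyGetD L (j-1) 0 = L.getD (j-1).toNat 0 := by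
      rw [PySem.List.pyGetD_eq_getElem L 0 (by omega) (by omega),
          List.getD_eq_getElem L 0 (by omega)]
    by_cases hk1 : (k:Int)+1 = j
    · have hkn : k = (j-1).toNat := hkj.mpr hk1
      have hmemc : ((k:Int)+1) ∈ j :: js := by simp [List.mem_cons, hk1]
      rw [hLk, if_pos hkn, hx, ← hkn, if_pos hmemc]
      by_cases hm : ((k:Int)+1) ∈ js
      · rw [if_pos hm, max_assoc, max_self]
      · rw [if_neg hm]
    · have hkn : ¬ (k = (j-1).toNat) := fun h => hk1 (hkj.mp h)
      by_cases hm : ((k:Int)+1) ∈ js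
      · rw [hLk, if_neg hkn, if_pos hm, if_pos (List.mem_cons_of_mem _ hm)]
      · rw [hLk, if_neg hkn, if_neg hm, if_neg (by simp [List.mem_cons, hk1, hm])]

theorem outerA_spec (A : List Int) :
    ∀ (c t : Nat) (L : List Int), c = A.length - t → t ≤ A.length → L.length = A.length →
    (∀ k, k < A.length → L.getD k 0 = if k+1 ≤ t then FF A A.length (k+1) else dvv A t (k+1)) →
    ((PySem.List.pyRange ((t:Int)+1) ((A.length:Int)+1) 1).foldl
        (stepOuterA A (A.length : Int)) L).length = A.length ∧
    (∀ k, k < A.length →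
      ((PySem.List.pyRange ((t:Int)+1) ((A.length:Int)+1) 1).foldl
        (stepOuterA A (A.length : Int)) L).getD k 0 = FF A A.length (k+1)) := by
  intro c
  induction c with
  | zero =>
    intro t L hc ht hlen hinv
    have htn : t = A.length := by omega
    rw [PySem.List.pyRange_one_eq_nil (by omega)]
    refine ⟨hlen, ?_⟩
    intro k hk
    have := hinv k hk
    rw [if_pos (by omega)] at this
    simpa using this
  | succ c ihc =>
    intro t L hc ht hlen hinv
    have htn : t < A.length := by omega
    rw [PySem.List.pyRange_one_cons (by exact_mod_cast (by omega : (t:Int)+1 < (A.length:Int)+1)),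
        List.foldl_cons]
    -- one outer step at i = t+1
    have hidx : ((t:Int)+1-1) = (t:Int) := by ring
    have hmx : PySem.List.pyGetD L ((t:Int)+1-1) 0 = dvv A t (t+1) := by
      rw [hidx, PySem.List.pyGetD_natCast]
      have := hinv t htn
      rwa [if_neg (by omega)] at this
    have hb : ∀ j ∈ PySem.List.pyRange ((t:Int)+1) ((A.length:Int)+1) ((t:Int)+1),
        1 ≤ j ∧ j ≤ (L.length : Int) := by
      intro j hj
      rw [PySem.List.mem_pyRange_iff_of_pos (by omega)] at hj
      constructor <;> [omega; rw [hlen]]; omega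
    obtain ⟨h1, h2, h3⟩ := innerA_spec A (PySem.List.pyGetD A ((t:Int)+1-1) 0)
      (PySem.List.pyRange ((t:Int)+1) ((A.length:Int)+1) ((t:Int)+1)) L
      (PySem.List.pyGetD L ((t:Int)+1-1) 0) hb
    set js := PySem.List.pyRange ((t:Int)+1) ((A.length:Int)+1) ((t:Int)+1) with hjs
    set p := js.foldl (stepInnerA A ((t:Int)+1))
      (L, PySem.List.pyGetD L ((t:Int)+1-1) 0) with hp
    have hpeq : p = js.foldl (fun (q : List Int × Int) j =>
        (PySem.List.pySetD q.1 (j-1) (max (PySem.List.pyGetD q.1 (j-1) 0)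
          (PySem.List.pyGetD A ((t:Int)+1-1) 0)),
         max q.2 (PySem.List.pyGetD A (j-1) 0))) (L, PySem.List.pyGetD L ((t:Int)+1-1) 0) := rfl
    have hv : PySem.List.pyGetD A ((t:Int)+1-1) 0 = A.getD t 0 := by
      rw [hidx, PySem.List.pyGetD_natCast]
    -- the second component is FF A n (t+1)
    have hp2 : p.2 = FF A A.length (t+1) := by
      rw [hpeq, h3, hmx, FF]
      have e1 : ((t+1 : Nat) : Int) = (t:Int)+1 := by push_cast; ring
      have e2 : (t+1) - 1 = t := rfl
      rw [e1, e2]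
    -- the one-step list
    have hstep : stepOuterA A (A.length : Int) L ((t:Int)+1) = p.1.set t p.2 := by
      show PySem.List.pySetD p.1 ((t:Int)+1-1) p.2 = p.1.set t p.2
      rw [hidx, PySem.List.pySetD_of_nonneg _ _ (by omega)]
      simp
    rw [hstep]
    rw [← hpeq] at h1
    have hp1len : p.1.length = A.length := by rw [h1, hlen]
    have hlen1 : (p.1.set t p.2).length = A.length := by rw [List.length_set, hp1len]
    refine ihc (t+1) (p.1.set t p.2) (by omega) (by omega) hlen1 ?_
    -- re-establish the invariant at t+1
    intro k hk
    have hgd := getD_set_eq_ite p.1 t p.2 0 k (by omega)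
    rw [hgd]
    by_cases hkt : k = t
    · rw [if_pos hkt, if_pos (by omega), hkt, hp2]
    · rw [if_neg hkt]
      have hpk := h2 k (by omega)
      rw [← hpeq] at hpk
      rcases Nat.lt_or_ge k t with hlt | hge
      · have hnot : ¬ (((k:Int)+1) ∈ js) := by
          intro hmem
          rw [hjs, PySem.List.mem_pyRange_iff_of_pos (by omega)] at hmem
          obtain ⟨hle, -, -⟩ := hmem
          omega
        rw [hpk, if_neg hnot, if_pos (by omega)]
        have := hinv k hk
        rwa [if_pos (by omega)] at this
      · have hgt : t < k := by omega
        have hmem : (((k:Int)+1) ∈ js) ↔ (t+1) ∣ (k+1) := by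
          rw [hjs, PySem.List.mem_pyRange_iff_of_pos (by omega)]
          constructor
          · rintro ⟨-, -, hd⟩
            have h' : ((t:Int)+1) ∣ ((k:Int)+1) := by
              have h3' := dvd_add hd (dvd_refl ((t:Int)+1))
              rwa [sub_add_cancel] at h3'
            exact_mod_cast h'
          · intro hd
            refine ⟨by omega, by omega, ?_⟩
            have h' : ((t:Int)+1) ∣ ((k:Int)+1) := by exact_mod_cast hd
            exact dvd_sub h' dvd_rfl
        have hdvv : dvv A (t+1) (k+1) =
            if (t+1) ∣ (k+1) then max (dvv A t (k+1)) (A.getD t 0) else dvv A t (k+1) := by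
          rw [dvv, List.range_succ, List.foldl_append]
          rfl
        have hold := hinv k hk
        rw [if_neg (by omega)] at hold
        rw [if_neg (by omega), hdvv, hpk, hv, hold]
        by_cases hd : (t+1) ∣ (k+1)
        · rw [if_pos (hmem.mpr hd), if_pos hd]
        · rw [if_neg (fun h => hd (hmem.mp h)), if_neg hd]

-- B's step on a positive pair collapses to a divisibility-guarded max
theorem stepBruteB_eq_maxIf (A : List Int) (i j best : Int) :
    stepBruteB A i best j =
      if (j ∣ i ∨ i ∣ j) then max best (PySem.List.pyGetD A (j-1) 0) else best := by
  rw [stepBruteB]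
  by_cases hc : j ∣ i ∨ i ∣ j
  · rw [if_pos hc]
    have hc' : PySem.Int.mod i j = 0 ∨ PySem.Int.mod j i = 0 := by
      rcases hc with h | h
      · exact Or.inl ((PySem.Int.mod_eq_zero_iff_dvd i j).mpr h)
      · exact Or.inr ((PySem.Int.mod_eq_zero_iff_dvd j i).mpr h)
    by_cases hgt : PySem.List.pyGetD A (j-1) 0 > best
    · rw [if_pos ⟨hc', hgt⟩]; omega
    · rw [if_neg (by tauto)]; omega
  · have hc' : ¬ (PySem.Int.mod i j = 0 ∨ PySem.Int.mod j i = 0) := by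
      rintro (h | h)
      · exact hc (Or.inl ((PySem.Int.mod_eq_zero_iff_dvd i j).mp h))
      · exact hc (Or.inr ((PySem.Int.mod_eq_zero_iff_dvd j i).mp h))
    rw [if_neg hc, if_neg (by tauto)]

-- B's row after the collapse, with a Nat upper bound m
def BFmax (A : List Int) (k m : Nat) : Int :=
  (PySem.List.pyRange 1 ((m:Int)+1) 1).foldl
    (fun b j => if (j ∣ ((k:Int)+1) ∨ ((k:Int)+1) ∣ j) then max b (PySem.List.pyGetD A (j-1) 0) else b)
    (A.getD k 0)

-- prefix j = 1..k of B's row is exactly the divisor fold dvv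
theorem BFmax_base (A : List Int) (k : Nat) : BFmax A k (k+1) = dvv A k (k+1) := by
  have e1 : ((k+1 : Nat) : Int) + 1 = ((k:Int)+1) + 1 := by push_cast; ring
  rw [BFmax, e1, PySem.List.pyRange_one_succ_right (by omega), List.foldl_append]
  have hpre : (PySem.List.pyRange 1 ((k:Int)+1) 1).foldl
      (fun b j => if (j ∣ ((k:Int)+1) ∨ ((k:Int)+1) ∣ j) then max b (PySem.List.pyGetD A (j-1) 0) else b)
      (A.getD k 0) = dvv A k (k+1) := by
    rw [PySem.List.pyRange_one, (by omega : ((k:Int)+1-1).toNat = k), dvv, List.foldl_map]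
    refine PySem.List.foldl_congr_mem _ _ _ _ ?_
    intro acc d hd
    have hdk : d < k := List.mem_range.mp hd
    have hnd : ¬ ((k:Int)+1) ∣ (1 + (d:Int)) := by
      intro h
      have := Int.le_of_dvd (by omega) h
      omega
    have hdv : ((1:Int) + (d:Int)) ∣ ((k:Int)+1) ↔ (d+1) ∣ (k+1) := by
      rw [(by push_cast; ring : (1:Int) + (d:Int) = ((d+1 : Nat) : Int)),
          (by push_cast; ring : ((k:Int)+1) = ((k+1 : Nat) : Int))]
      exact Int.natCast_dvd_natCast
    have hix : PySem.List.pyGetD A (1 + (d:Int) - 1) 0 = A.getD d 0 := by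
      rw [(by ring : (1:Int) + (d:Int) - 1 = (d:Int)), PySem.List.pyGetD_natCast]
    by_cases h : (d+1) ∣ (k+1)
    · rw [if_pos h, if_pos (Or.inl (hdv.mpr h)), hix]
    · rw [if_neg h, if_neg (by rintro (h' | h') <;> [exact h (hdv.mp h'); exact hnd h'])]
  rw [hpre]
  simp only [List.foldl_cons, List.foldl_nil]
  rw [if_pos (Or.inl dvd_rfl),
      (by ring : ((k:Int)+1) - 1 = (k:Int)), PySem.List.pyGetD_natCast]
  exact max_eq_left (by simpa using dvv_ge_seed A k (k+1))

theorem FF_base (A : List Int) (k : Nat) : FF A (k+1) (k+1) = dvv A k (k+1) := by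
  rw [FF]
  have e1 : ((k+1 : Nat) : Int) = (k:Int)+1 := by push_cast; ring
  rw [e1, pyRange_cons_of_pos (by omega) (by omega)]
  have hnil : PySem.List.pyRange ((k:Int)+1 + ((k:Int)+1)) ((k:Int)+1+1) ((k:Int)+1) = [] := by
    rw [PySem.List.pyRange_of_pos _ _ (by omega : (0:Int) < (k:Int)+1),
        if_neg (by omega)]
    simp
  rw [hnil]
  simp only [List.foldl_cons, List.foldl_nil]
  rw [(by rfl : (k+1) - 1 = k), (by ring : ((k:Int)+1) - 1 = (k:Int)), PySem.List.pyGetD_natCast]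
  exact max_eq_left (by simpa using dvv_ge_seed A k (k+1))

-- the two folds take the same step from m to m+1 once m ≥ k+1
theorem BFmax_succ (A : List Int) (k m : Nat) (h : k + 1 ≤ m) :
    BFmax A k (m+1) =
      if ((k:Int)+1) ∣ ((m:Int)+1) then max (BFmax A k m) (A.getD m 0) else BFmax A k m := by
  have e1 : ((m+1 : Nat) : Int) + 1 = ((m:Int)+1) + 1 := by push_cast; ring
  rw [BFmax, e1, PySem.List.pyRange_one_succ_right (by omega), List.foldl_append]
  simp only [List.foldl_cons, List.foldl_nil]
  have hnd : ¬ ((m:Int)+1) ∣ ((k:Int)+1) := by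
    intro h'
    have := Int.le_of_dvd (by omega) h'
    omega
  have hix : PySem.List.pyGetD A ((m:Int)+1-1) 0 = A.getD m 0 := by
    rw [(by ring : ((m:Int)+1-1) = (m:Int)), PySem.List.pyGetD_natCast]
  by_cases hd : ((k:Int)+1) ∣ ((m:Int)+1)
  · rw [if_pos hd, if_pos (Or.inr hd), hix]; rfl
  · rw [if_neg hd, if_neg (by rintro (h' | h') <;> [exact hnd h'; exact hd h'])]; rfl

theorem FF_succ (A : List Int) (k m : Nat) (h : k + 1 ≤ m) :
    FF A (m+1) (k+1) =
      if ((k:Int)+1) ∣ ((m:Int)+1) then max (FF A m (k+1)) (A.getD m 0) else FF A m (k+1) := by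
  rw [FF, FF]
  have e1 : ((k+1 : Nat) : Int) = (k:Int)+1 := by push_cast; ring
  have e2 : ((m+1 : Nat) : Int) + 1 = ((m:Int)+1) + 1 := by push_cast; ring
  rw [e1, e2, pyRange_snoc_stride (by omega : (0:Int) < (k:Int)+1) (by omega : (k:Int)+1 ≤ (m:Int)+1),
      List.foldl_append]
  by_cases hd : ((k:Int)+1) ∣ ((m:Int)+1)
  · rw [if_pos hd, if_pos hd]
    simp only [List.foldl_cons, List.foldl_nil]
    rw [(by ring : ((m:Int)+1-1) = (m:Int)), PySem.List.pyGetD_natCast]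
  · rw [if_neg hd, if_neg hd]
    simp

theorem BFmax_eq_FF (A : List Int) (k : Nat) :
    ∀ d, BFmax A k (k+1+d) = FF A (k+1+d) (k+1) := by
  intro d
  induction d with
  | zero => rw [BFmax_base, FF_base]
  | succ d ih =>
    rw [(by omega : k+1+(d+1) = (k+1+d)+1), BFmax_succ A k (k+1+d) (by omega),
        FF_succ A k (k+1+d) (by omega), ih]

-- B's row k+1 computes FF A n (k+1)
theorem rowB_eq (A : List Int) (k : Nat) (hk : k < A.length) :
    rowB A (A.length : Int) ((k:Int)+1) = FF A A.length (k+1) := by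
  have h1 : rowB A (A.length : Int) ((k:Int)+1) = BFmax A k A.length := by
    rw [rowB, BFmax,
        (by ring : ((k:Int)+1) - 1 = (k:Int)), PySem.List.pyGetD_natCast]
    refine PySem.List.foldl_congr_mem _ _ _ _ ?_
    intro acc j _
    exact stepBruteB_eq_maxIf A ((k:Int)+1) j acc
  obtain ⟨d, hd⟩ : ∃ d, A.length = k + 1 + d := ⟨A.length - (k+1), by omega⟩
  rw [h1, hd, BFmax_eq_FF]

-- the two programs build the same Ad list
theorem ad_eq (A : List Int) :
    (PySem.List.pyRange 1 ((A.length:Int)+1) 1).foldl (stepOuterA A (A.length : Int)) A =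
    (PySem.List.pyRange 1 ((A.length:Int)+1) 1).foldl
      (fun Ad i => Ad ++ [rowB A (A.length : Int) i]) [] := by
  have e0 : ((0:Nat):Int)+1 = (1:Int) := by norm_num
  have hinv0' : ∀ k, k < A.length →
      A.getD k 0 = if k+1 ≤ 0 then FF A A.length (k+1) else dvv A 0 (k+1) := by
    intro k hk; rw [if_neg (by omega), dvv]; simp
  obtain ⟨hAl, hAv⟩ := by
    have := outerA_spec A A.length 0 A (by omega) (by omega) rfl hinv0'
    rwa [e0] at this
  rw [PySem.List.foldl_append_singleton_eq_map (rowB A (A.length : Int))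
      (PySem.List.pyRange 1 ((A.length:Int)+1) 1) []]
  simp only [List.nil_append]
  have hlenR : ((PySem.List.pyRange 1 ((A.length:Int)+1) 1).map
      (rowB A (A.length : Int))).length = A.length := by
    rw [List.length_map, PySem.List.length_pyRange_one]; omega
  apply List.ext_getElem (by rw [hAl, hlenR])
  intro k h1 h2
  have hk : k < A.length := by rwa [hAl] at h1
  rw [← List.getD_eq_getElem _ (0:Int) h1, hAv k hk,
      List.getElem_map, PySem.List.getElem_pyRange_one]
  have harg : (1 : Int) + (k : Int) = (k:Int)+1 := by ring
  rw [harg]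
  exact (rowB_eq A k hk).symm

-- ===== VERDICT (by name: the statement is the Claim_ definition above) =====
theorem solve_spec : Claim_equal_solve := by
  intro A B _ _
  unfold Spec_solve solve solve_alt
  simp only [PySem.List.len_eq]
  rw [ad_eq A]
  generalize ((PySem.List.pyRange 1 ((A.length:Int)+1) 1).foldl
      (fun Ad i => Ad ++ [rowB A (A.length : Int) i]) []) = Ad
  generalize ((PySem.List.max? A (fun y => y)).getD 0 : Int) = mxi
  have hstep : (fun (ans : List Int) (q : List Int) =>
      if PySem.List.pyGetD q 1 0 = 0 then ans ++ [PySem.List.pyGetD A (PySem.List.pyGetD q 0 0 - 1) 0]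
      else if PySem.List.pyGetD q 1 0 = 1 then ans ++ [PySem.List.pyGetD Ad (PySem.List.pyGetD q 0 0 - 1) 0]
      else ans ++ [mxi]) = (fun ans q => ans ++ [(fun (q : List Int) =>
        if PySem.List.pyGetD q 1 0 = 0 then PySem.List.pyGetD A (PySem.List.pyGetD q 0 0 - 1) 0
        else if PySem.List.pyGetD q 1 0 = 1 then PySem.List.pyGetD Ad (PySem.List.pyGetD q 0 0 - 1) 0
        else mxi) q]) := by
    funext ans q; beta_reduce; split_ifs <;> rfl
  rw [hstep, PySem.List.foldl_append_singleton_eq_map]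
  simp
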